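-- pv_equiv track=rewrite | github.com/Pancho26/Computacion2_Francofurfuri | bloque_0/argparse/buscar.py | procesar_lineas
-- ===== SOURCE A (Python) =====
-- def coincide(linea, patron, ignore_case=False):
--     if ignore_case:
--         return patron.lower() in linea.lower()
--     return patron in linea
--
-- def procesar_lineas(lineas, patron, mostrar_numero, invertir, contar, prefijo=None, ignore_case=False):
--     coincidencias = 0
--     salida = []
--
--     for numero, linea in enumerate(lineas, start=1):
--         linea = linea.rstrip("\n")
--         match = coincide(linea, patron, ignore_case)
--
--         if invertir:
--             match = not match
--
--         if match:
--             coincidencias += 1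
--             if not contar:
--                 partes = []
--
--                 if prefijo:
--                     partes.append(prefijo)
--
--                 if mostrar_numero:
--                     partes.append(str(numero))
--
--                 if partes:
--                     salida.append(":".join(partes) + f": {linea}")
--                 else:
--                     salida.append(linea)
--
--     return coincidencias, salida
-- ===== SOURCE B (Python) =====
-- def procesar_lineas(lineas, patron, mostrar_numero, invertir, contar, prefijo=None, ignore_case=False):
--     # Divide and conquer: recursively split the line list in half; each half
--     # returns its own (count, formatted output), combined by (+, concatenation).
--     pat = patron.lower() if ignore_case else patron
--
--     def go(chunk, start):
--         # start = 1-based line number of chunk[0]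
--         if not chunk:
--             return 0, []
--         if len(chunk) == 1:
--             linea = chunk[0].rstrip("\n")
--             m = (pat in (linea.lower() if ignore_case else linea)) != bool(invertir)
--             if not m:
--                 return 0, []
--             if contar:
--                 return 1, []
--             partes = ([prefijo] if prefijo else []) + ([str(start)] if mostrar_numero else [])
--             return 1, [":".join(partes) + f": {linea}" if partes else linea]
--         mid = len(chunk) // 2
--         c1, s1 = go(chunk[:mid], start)
--         c2, s2 = go(chunk[mid:], start + mid)
--         return c1 + c2, s1 + s2
--
--     return go(lineas, 1)
-- ===== Notes on version B (the rewrite author's own statement) =====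
-- stated objective: alternative
-- what changed: Replaces A's single left-to-right stateful loop by a divide-and-conquer recursion: the line list is split in half, each half is processed recursively into its own (count, output), and results are combined by addition and concatenation (correct because line numbering is offset by the left half's length and the result is a fold over a monoid).
import Mathlib
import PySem

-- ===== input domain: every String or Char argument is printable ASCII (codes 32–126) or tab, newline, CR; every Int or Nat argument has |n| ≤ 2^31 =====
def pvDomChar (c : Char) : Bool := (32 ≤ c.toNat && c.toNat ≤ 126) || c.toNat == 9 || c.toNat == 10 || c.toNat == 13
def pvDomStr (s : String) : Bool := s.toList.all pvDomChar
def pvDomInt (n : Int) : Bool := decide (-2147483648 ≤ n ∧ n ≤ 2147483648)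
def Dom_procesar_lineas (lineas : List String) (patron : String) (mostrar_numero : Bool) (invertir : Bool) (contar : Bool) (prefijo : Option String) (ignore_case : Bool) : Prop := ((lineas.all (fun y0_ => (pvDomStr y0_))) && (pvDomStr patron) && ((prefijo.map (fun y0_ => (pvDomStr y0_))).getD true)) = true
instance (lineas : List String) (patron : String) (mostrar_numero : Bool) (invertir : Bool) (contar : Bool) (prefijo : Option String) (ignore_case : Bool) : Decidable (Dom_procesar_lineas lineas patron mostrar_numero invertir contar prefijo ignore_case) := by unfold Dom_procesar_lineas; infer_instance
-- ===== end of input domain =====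

-- B replaces A's single left-to-right stateful loop by a divide-and-conquer recursion on the line list
-- (objective: alternative decomposition, same matching work).

-- ===== PORT A =====

-- Python's enumerate(lineas, start=n)
def pvEnumFrom (n : Int) : List String → List (Int × String)
  | [] => []
  | l :: ls => (n, l) :: pvEnumFrom (n + 1) ls

-- s.rstrip("\n"): drop all trailing '\n' characters (hand port, exact: rstrip with an explicit char set)
def rstripNl (s : String) : String :=
  String.ofList ((s.toList.reverse.dropWhile (fun c => c == '\n')).reverse)

-- string concatenation a + b (kernel-transparent)
def strCat (a b : String) : String := String.ofList (a.toList ++ b.toList)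

-- helper coincide(linea, patron, ignore_case) from A's module
def coincideA (linea patron : String) (ignore_case : Bool) : Bool :=
  if ignore_case then PySem.Str.isIn (PySem.Str.lower patron) (PySem.Str.lower linea)
  else PySem.Str.isIn patron linea

-- Python truthiness of the optional prefijo string
def pvTruthy : Option String → Bool
  | some s => s != ""
  | none => false

-- the body of A's for-loop, acting on the state (coincidencias, salida)
def pvStepA (patron : String) (mostrar_numero invertir contar : Bool) (prefijo : Option String)
    (ignore_case : Bool) (st : Int × List String) (p : Int × String) : Int × List String :=
  let linea := rstripNl p.2
  let m0 := coincideA linea patron ignore_case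
  let m := if invertir then !m0 else m0
  if m then
    let c := st.1 + 1
    if !contar then
      let partes : List String :=
        (if pvTruthy prefijo then [prefijo.getD ""] else []) ++
        (if mostrar_numero then [PySem.Int.toStr p.1] else [])
      if !partes.isEmpty then
        (c, st.2 ++ [strCat (PySem.Str.join ":" partes) (strCat ": " linea)])
      else (c, st.2 ++ [linea])
    else (c, st.2)
  else st

def procesar_lineas (lineas : List String) (patron : String) (mostrar_numero : Bool) (invertir : Bool) (contar : Bool) (prefijo : Option String) (ignore_case : Bool) : Int × List String :=
  (pvEnumFrom 1 lineas).foldl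
    (pvStepA patron mostrar_numero invertir contar prefijo ignore_case) (0, [])

-- ===== PORT B =====

-- B's recursive divide-and-conquer worker go(chunk, start)
def goB (pat : String) (mn inv cnt : Bool) (pref : List String) (ic : Bool)
    (chunk : List String) (start : Int) : Int × List String :=
  match chunk with
  | [] => (0, [])
  | [l] =>
    let linea := rstripNl l
    let m := (PySem.Str.isIn pat (if ic then PySem.Str.lower linea else linea)) != inv
    if !m then (0, [])
    else if cnt then (1, [])
    else
      let partes := pref ++ (if mn then [PySem.Int.toStr start] else [])
      (1, [if !partes.isEmpty then strCat (PySem.Str.join ":" partes) (strCat ": " linea) else linea])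
  | l1 :: l2 :: rest =>
    let mid := (l1 :: l2 :: rest).length / 2
    let r1 := goB pat mn inv cnt pref ic ((l1 :: l2 :: rest).take mid) start
    let r2 := goB pat mn inv cnt pref ic ((l1 :: l2 :: rest).drop mid) (start + (mid : Int))
    (r1.1 + r2.1, r1.2 ++ r2.2)
termination_by chunk.length
decreasing_by
  · simp [List.length_take]; omega
  · simp; omega

def procesar_lineas_alt (lineas : List String) (patron : String) (mostrar_numero : Bool) (invertir : Bool) (contar : Bool) (prefijo : Option String) (ignore_case : Bool) : Int × List String :=
  let pat := if ignore_case then PySem.Str.lower patron else patron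
  goB pat mostrar_numero invertir contar
    (if pvTruthy prefijo then [prefijo.getD ""] else []) ignore_case lineas 1

-- ===== PRECONDITION & SPEC =====
def Spec_procesar_lineas (lineas : List String) (patron : String) (mostrar_numero : Bool) (invertir : Bool) (contar : Bool) (prefijo : Option String) (ignore_case : Bool) (out : Int × List String) : Prop := out = procesar_lineas_alt lineas patron mostrar_numero invertir contar prefijo ignore_case
instance (lineas : List String) (patron : String) (mostrar_numero : Bool) (invertir : Bool) (contar : Bool) (prefijo : Option String) (ignore_case : Bool) (out : Int × List String) : Decidable (Spec_procesar_lineas lineas patron mostrar_numero invertir contar prefijo ignore_case out) := by unfold Spec_procesar_lineas; infer_instance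

-- ===== CLAIM (what is proved, stated in full; the proofs are below) =====
def Claim_equal_procesar_lineas : Prop := ∀ (lineas : List String) (patron : String) (mostrar_numero : Bool) (invertir : Bool) (contar : Bool) (prefijo : Option String) (ignore_case : Bool), Dom_procesar_lineas lineas patron mostrar_numero invertir contar prefijo ignore_case → Spec_procesar_lineas lineas patron mostrar_numero invertir contar prefijo ignore_case (procesar_lineas lineas patron mostrar_numero invertir contar prefijo ignore_case)

-- ===== LEMMAS AND PROOFS =====

-- common characterization: matches = filter over enumerate, output = map of the formatter
def pvHit (pat : String) (ic : Bool) (l : String) : Bool :=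
  if ic then PySem.Str.isIn pat (PySem.Str.lower l) else PySem.Str.isIn pat l

def pvFmt (mn : Bool) (pref : List String) (p : Int × String) : String :=
  let partes := pref ++ (if mn then [PySem.Int.toStr p.1] else [])
  if !partes.isEmpty then strCat (PySem.Str.join ":" partes) (strCat ": " p.2) else p.2

def pvSpecS (pat : String) (mn inv cnt : Bool) (pref : List String) (ic : Bool)
    (chunk : List String) (n : Int) : Int × List String :=
  let ms := (pvEnumFrom n (chunk.map rstripNl)).filter (fun p => pvHit pat ic p.2 != inv)
  ((ms.length : Int), if cnt then [] else ms.map (pvFmt mn pref))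

lemma pvEnumFrom_append (xs ys : List String) : ∀ n : Int,
    pvEnumFrom n (xs ++ ys) = pvEnumFrom n xs ++ pvEnumFrom (n + xs.length) ys := by
  induction xs with
  | nil => intro n; simp [pvEnumFrom]
  | cons x xs ih =>
    intro n
    simp only [List.cons_append, pvEnumFrom, ih (n + 1), List.length_cons]
    congr 1
    push_cast
    ring_nf

lemma pvSpecS_append (pat : String) (mn inv cnt : Bool) (pref : List String) (ic : Bool)
    (xs ys : List String) (n : Int) :
    pvSpecS pat mn inv cnt pref ic (xs ++ ys) n =
      ((pvSpecS pat mn inv cnt pref ic xs n).1 + (pvSpecS pat mn inv cnt pref ic ys (n + xs.length)).1,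
       (pvSpecS pat mn inv cnt pref ic xs n).2 ++ (pvSpecS pat mn inv cnt pref ic ys (n + xs.length)).2) := by
  simp only [pvSpecS, List.map_append, pvEnumFrom_append, List.filter_append, List.length_append,
    List.map_append, List.length_map]
  cases cnt <;> simp

-- B's worker computes the common characterization (strong induction on the chunk length)
lemma goB_eq_spec (pat : String) (mn inv cnt : Bool) (pref : List String) (ic : Bool) :
    ∀ (k : Nat) (chunk : List String) (n : Int), chunk.length ≤ k →
    goB pat mn inv cnt pref ic chunk n = pvSpecS pat mn inv cnt pref ic chunk n := by
  intro k
  induction k with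
  | zero =>
    intro chunk n h
    match chunk with
    | [] => simp [goB, pvSpecS, pvEnumFrom]
  | succ k ih =>
    intro chunk n h
    match chunk with
    | [] => simp [goB, pvSpecS, pvEnumFrom]
    | [l] =>
      simp only [goB, pvSpecS, List.map, pvEnumFrom, List.filter, pvHit]
      cases ic <;>
        cases h1 : PySem.Chars.isIn pat.toList (rstripNl l).toList <;>
        cases h2 : PySem.Chars.isIn pat.toList (PySem.Chars.lower (rstripNl l).toList) <;>
        cases inv <;> cases cnt <;> simp [h1, h2, pvFmt]
    | l1 :: l2 :: rest =>
      rw [goB]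
      rw [ih ((l1 :: l2 :: rest).take ((l1 :: l2 :: rest).length / 2)) n
            (by simp [List.length_take] at h ⊢; omega),
          ih ((l1 :: l2 :: rest).drop ((l1 :: l2 :: rest).length / 2))
            (n + (((l1 :: l2 :: rest).length / 2 : Nat) : Int))
            (by simp at h ⊢; omega)]
      have hsplit := pvSpecS_append pat mn inv cnt pref ic
        ((l1 :: l2 :: rest).take ((l1 :: l2 :: rest).length / 2))
        ((l1 :: l2 :: rest).drop ((l1 :: l2 :: rest).length / 2)) n
      rw [List.take_append_drop] at hsplit
      rw [hsplit]
      congr 2 <;>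
      · congr 2
        simp [List.length_take]
        omega

-- one step of A's loop, rephrased through the hit test and formatter
lemma stepA_eq (patron : String) (mn inv cnt : Bool) (prefijo : Option String) (ic : Bool)
    (st : Int × List String) (p : Int × String) :
    pvStepA patron mn inv cnt prefijo ic st p =
      if pvHit (if ic then PySem.Str.lower patron else patron) ic (rstripNl p.2) != inv then
        (st.1 + 1, st.2 ++ (if cnt then [] else
          [pvFmt mn (if pvTruthy prefijo then [prefijo.getD ""] else []) (p.1, rstripNl p.2)]))
      else st := by
  simp only [pvStepA, coincideA, pvHit, pvFmt]
  cases ic <;> cases inv <;> cases cnt <;>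
    cases hm : PySem.Chars.isIn (PySem.Chars.lower patron.toList) (PySem.Chars.lower (rstripNl p.2).toList) <;>
    cases hm2 : PySem.Chars.isIn patron.toList (rstripNl p.2).toList <;>
    simp [hm, hm2] <;> split_ifs <;> rfl

-- A's whole loop computes the common characterization (stated explicitly)
lemma loopA (patron : String) (mn inv cnt : Bool) (prefijo : Option String) (ic : Bool) :
    ∀ (ls : List String) (n c : Int) (acc : List String),
    (pvEnumFrom n ls).foldl (pvStepA patron mn inv cnt prefijo ic) (c, acc)
    = (c + (((pvEnumFrom n (ls.map rstripNl)).filter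
          (fun p => pvHit (if ic then PySem.Str.lower patron else patron) ic p.2 != inv)).length : Int),
       acc ++ (if cnt then [] else
         ((pvEnumFrom n (ls.map rstripNl)).filter
          (fun p => pvHit (if ic then PySem.Str.lower patron else patron) ic p.2 != inv)).map
            (pvFmt mn (if pvTruthy prefijo then [prefijo.getD ""] else []))))
  | [], n, c, acc => by simp [pvEnumFrom]
  | l :: ls, n, c, acc => by
    simp only [pvEnumFrom, List.map, List.foldl, stepA_eq, List.filter]
    cases h : pvHit (if ic then PySem.Str.lower patron else patron) ic (rstripNl l) != inv
    · simp only [Bool.false_eq_true, if_false]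
      exact loopA patron mn inv cnt prefijo ic ls (n+1) c acc
    · simp only [if_true]
      rw [loopA patron mn inv cnt prefijo ic ls (n+1) (c+1)]
      cases cnt <;> simp <;> omega

-- ===== VERDICT (by name: the statement is the Claim_ definition above) =====
theorem procesar_lineas_spec : Claim_equal_procesar_lineas := by
  intro lineas patron mn inv cnt prefijo ic _
  unfold Spec_procesar_lineas procesar_lineas procesar_lineas_alt
  rw [loopA, goB_eq_spec _ _ _ _ _ _ lineas.length _ _ le_rfl]
  simp only [pvSpecS]
  cases cnt <;> simp
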